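-- pv_equiv track=rewrite | github.com/leejy001/Algorithm | Python/Practice/programmers_077.py | solution
-- ===== SOURCE A (Python) =====
-- def check(p):
--     u = []
--     try:
--         for i in p:
--             if i == '(':
--                 u.append('(')
--             else:
--                 u.pop()
--         return True
--     except:
--         return False
--
-- def split(p):
--     cnt = 0
--     for i in range(len(p)):
--         if p[i] == '(':
--             cnt += 1
--         else:
--             cnt -= 1
--         if cnt == 0:
--             break
--     return p[:i+1], p[i+1:]
--
-- def convert (u):
--     temp = ''
--     for i in u:
--         if i == '(':
--             temp += ')'
--         else:
--             temp += '('
--     return temp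
--
-- def solution(p):
--     answer = ''
--     while len(p) != 0:
--         u, p = split(p)
--         if check(u):
--             answer += u
--         else:
--             answer += '(' + solution(p) + ')' + convert(u[1:-1])
--             break
--
--     return answer
-- ===== SOURCE B (Python) =====
-- def cut_index(p):
--     # length of the shortest nonempty prefix with balance 0 (or len(p) if none)
--     bal = 0
--     for i, ch in enumerate(p):
--         bal += 1 if ch == '(' else -1
--         if bal == 0:
--             return i + 1
--     return len(p)
--
-- def flip(m):
--     return ''.join(')' if c == '(' else '(' for c in m)
--
-- def solution(p):
--     # Direct recursion; a shortest balanced chunk is "correct" iff it starts with '(',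
--     # so no exception-based check pass is needed.
--     if not p:
--         return ''
--     k = cut_index(p)
--     u, rest = p[:k], p[k:]
--     if p[0] == '(':
--         return u + solution(rest)
--     return '(' + solution(rest) + ')' + flip(u[1:-1])
-- ===== Notes on version B (the rewrite author's own statement) =====
-- stated objective: simpler
-- what changed: B drops the exception-based check pass entirely (a shortest balanced chunk is correct iff it starts with an opening parenthesis) and replaces A's while-loop-with-accumulator-plus-recursion-at-the-first-bad-chunk by direct structural recursion, flipping the middle with a single map.
import Mathlib
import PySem

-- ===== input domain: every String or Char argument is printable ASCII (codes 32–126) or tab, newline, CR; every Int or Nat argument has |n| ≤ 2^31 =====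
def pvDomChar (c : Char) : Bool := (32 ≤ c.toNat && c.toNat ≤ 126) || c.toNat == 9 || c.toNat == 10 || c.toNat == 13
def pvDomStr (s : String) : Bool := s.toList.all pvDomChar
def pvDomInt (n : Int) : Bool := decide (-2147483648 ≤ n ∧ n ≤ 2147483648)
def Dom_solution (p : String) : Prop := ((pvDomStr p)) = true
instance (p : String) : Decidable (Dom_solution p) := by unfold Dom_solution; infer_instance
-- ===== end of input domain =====

-- B drops A's exception-based check pass (a shortest balanced chunk is correct iff it starts
-- with an opening parenthesis) and replaces the while+recursion by direct structural recursion (simpler, same cost).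


-- ===== PORT A =====

-- check(p): push '(' for '(', pop otherwise; an empty pop raises IndexError → except → False.
def checkL : List Char → List Char → Bool
  | [], _ => true
  | c :: r, u =>
      if c = '(' then checkL r ('(' :: u)
      else match u with
        | [] => false
        | _ :: t => checkL r t

-- split(p): cnt counter over p, break at the first index where cnt hits 0;
-- returns (p[:i+1], p[i+1:]); if cnt never hits 0 the loop ends at i = len(p)-1, i.e. (p, []).
def splitL : List Char → Int → List Char × List Char
  | [], _ => ([], [])
  | c :: rest, cnt =>
      let cnt' := if c = '(' then cnt + 1 else cnt - 1
      if cnt' = 0 then ([c], rest)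
      else
        let pr := splitL rest cnt'
        (c :: pr.1, pr.2)

-- convert(u): flip each bracket, building temp left to right.
def convertL (u : List Char) : List Char :=
  u.foldl (fun temp i => temp ++ [if i = '(' then ')' else '(']) []

theorem splitL_snd_lt : ∀ (p : List Char) (cnt : Int), p ≠ [] →
    (splitL p cnt).2.length < p.length := by
  intro p
  induction p with
  | nil => intro _ h; exact absurd rfl h
  | cons c rest ih =>
      intro cnt _
      simp only [splitL]
      split_ifs with h1 h2 h3
      · simp
      · rcases rest with _ | ⟨d, r⟩
        · simp [splitL]
        · simpa using Nat.lt_succ_of_lt (by simpa using ih (cnt + 1) (by simp))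
      · simp
      · rcases rest with _ | ⟨d, r⟩
        · simp [splitL]
        · simpa using Nat.lt_succ_of_lt (by simpa using ih (cnt - 1) (by simp))

-- solution(p): the while loop with its `answer` accumulator; when check(u) fails it calls
-- solution on the remainder (here: aLoop p' [], a fresh call with answer = '') and breaks.
def aLoop : List Char → List Char → List Char
  | [], answer => answer
  | c :: rest, answer =>
      let pr := splitL (c :: rest) 0
      let u := pr.1
      let p' := pr.2
      if checkL u [] then aLoop p' (answer ++ u)
      else answer ++ ['('] ++ aLoop p' [] ++ [')'] ++ convertL u.tail.dropLast  -- u[1:-1]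
termination_by p _ => p.length
decreasing_by all_goals exact splitL_snd_lt (c :: rest) 0 (by simp)

def solution (p : String) : String := String.ofList (aLoop p.toList [])

-- ===== PORT B =====

-- cut_index(p): length of the shortest nonempty prefix with balance 0, or len(p) if none.
def cutIdx : List Char → Int → Nat
  | [], _ => 0
  | ch :: r, bal =>
      let b := if ch = '(' then bal + 1 else bal - 1
      if b = 0 then 1 else 1 + cutIdx r b

theorem cutIdx_pos (c : Char) (r : List Char) (bal : Int) : 1 ≤ cutIdx (c :: r) bal := by
  rw [cutIdx]; split <;> split <;> omega

-- flip(m): bracket-flip via a character map (the join-comprehension in Source B).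
def flipL (m : List Char) : List Char :=
  m.map (fun c => if c = '(' then ')' else '(')

-- solution(p), B: direct recursion; a chunk is correct iff its first character is '('.
def bSolve : List Char → List Char
  | [] => []
  | c :: rest =>
      let k := cutIdx (c :: rest) 0
      let u := (c :: rest).take k
      let r := (c :: rest).drop k
      if c = '(' then u ++ bSolve r
      else '(' :: bSolve r ++ ')' :: flipL u.tail.dropLast  -- u[1:-1]
termination_by p => p.length
decreasing_by
  all_goals
    have h1 := cutIdx_pos c rest 0
    simp only [List.length_drop, List.length_cons]
    try omega

def solution_alt (p : String) : String := String.ofList (bSolve p.toList)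

-- ===== PRECONDITION & SPEC =====
def Spec_solution (p : String) (out : String) : Prop := out = solution_alt p
instance (p : String) (out : String) : Decidable (Spec_solution p out) := by unfold Spec_solution; infer_instance

-- ===== CLAIM (what is proved, stated in full; the proofs are below) =====
def Claim_equal_solution : Prop := ∀ (p : String), Dom_solution p → Spec_solution p (solution p)

-- ===== LEMMAS AND PROOFS =====

-- A's split returns exactly (take k, drop k) for B's cut index.
theorem splitL_eq_cut : ∀ (p : List Char) (cnt : Int),
    splitL p cnt = (p.take (cutIdx p cnt), p.drop (cutIdx p cnt)) := by
  intro p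
  induction p with
  | nil => intro cnt; simp [splitL, cutIdx]
  | cons c rest ih =>
      intro cnt
      simp only [splitL, cutIdx, ih]
      split <;> split <;>
        simp [Nat.add_comm 1 _, List.take_succ_cons, List.drop_succ_cons]

-- checkL succeeds on the rest of a chunk while the counter stays positive,
-- with the stack holding exactly that many '('s (any chars of that length work).
theorem checkL_chunk : ∀ (p : List Char) (k : Nat) (stk : List Char),
    1 ≤ k → stk.length = k → checkL ((splitL p (k : Int)).1) stk = true := by
  intro p
  induction p with
  | nil => intro k stk _ _; simp [splitL, checkL]
  | cons c rest ih =>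
      intro k stk hk hlen
      simp only [splitL]
      by_cases hc : c = '('
      · have hne : ¬ ((k : Int) + 1 = 0) := by omega
        simp only [hc]
        show checkL ('(' :: (splitL rest ((k : Int) + 1)).1) stk = true
        simp only [checkL]
        have : ((k : Int) + 1) = ((k + 1 : Nat) : Int) := by push_cast; ring
        rw [this]
        exact ih (k + 1) ('(' :: stk) (by omega) (by simp [hlen])
      · rcases stk with _ | ⟨s, t⟩
        · simp at hlen; omega
        · simp only [if_neg hc]
          by_cases h0 : (k : Int) - 1 = 0
          · simp only [if_pos h0]
            simp [checkL, hc]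
          · simp only [if_neg h0]
            show checkL (c :: (splitL rest ((k : Int) - 1)).1) (s :: t) = true
            simp only [checkL, if_neg hc]
            have hk2 : 2 ≤ k := by omega
            have : ((k : Int) - 1) = ((k - 1 : Nat) : Int) := by omega
            rw [this]
            exact ih (k - 1) t (by omega) (by simp at hlen; omega)

-- check(u) for a chunk u = split(p)[0] is exactly "p starts with '('".
theorem checkL_split_head (c : Char) (rest : List Char) :
    checkL ((splitL (c :: rest) 0).1) [] = (c = '(' : Bool) := by
  simp only [splitL]
  by_cases hc : c = '('
  · simp only [hc]
    norm_num
    show checkL ('(' :: (splitL rest 1).1) [] = true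
    simp only [checkL]
    have : (1 : Int) = ((1 : Nat) : Int) := rfl
    rw [this]
    exact checkL_chunk rest 1 ['('] le_rfl rfl
  · simp only [if_neg hc]
    norm_num [hc]
    show checkL (c :: (splitL rest (0 - 1)).1) [] = false
    simp [checkL, hc]

-- A's convert is B's map.
theorem foldl_flip : ∀ (l acc : List Char),
    l.foldl (fun temp i => temp ++ [if i = '(' then ')' else '(']) acc = acc ++ flipL l
  | [], acc => by simp [flipL]
  | x :: xs, acc => by
      simp only [List.foldl, flipL, List.map]
      rw [foldl_flip xs]
      simp [flipL]

theorem convertL_eq_flip (u : List Char) : convertL u = flipL u := by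
  unfold convertL
  rw [foldl_flip]
  simp

theorem aLoop_acc : ∀ (n : Nat) (p : List Char), p.length ≤ n →
    ∀ ans, aLoop p ans = ans ++ aLoop p [] := by
  intro n
  induction n with
  | zero =>
      intro p hp ans
      have hp0 : p = [] := by cases p <;> simp_all
      subst hp0; simp [aLoop]
  | succ n ih =>
      intro p hp ans
      cases p with
      | nil => simp [aLoop]
      | cons c rest =>
          have hlt : (splitL (c :: rest) 0).2.length ≤ n := by
            have := splitL_snd_lt (c :: rest) 0 (by simp)
            simp only [List.length_cons] at hp this; omega
          rw [aLoop, aLoop]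
          split
          · rw [ih _ hlt (ans ++ (splitL (c :: rest) 0).1),
                ih _ hlt ([] ++ (splitL (c :: rest) 0).1)]
            simp
          · simp

-- main equivalence of the two cores
theorem aLoop_eq_bSolve : ∀ (n : Nat) (p : List Char), p.length ≤ n →
    aLoop p [] = bSolve p := by
  intro n
  induction n with
  | zero =>
      intro p hp
      have hp0 : p = [] := by cases p <;> simp_all
      subst hp0; simp [aLoop, bSolve]
  | succ n ih =>
      intro p hp
      cases p with
      | nil => simp [aLoop, bSolve]
      | cons c rest =>
          have hd : (List.drop (cutIdx (c :: rest) 0) (c :: rest)).length ≤ n := by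
            have := splitL_snd_lt (c :: rest) 0 (by simp)
            rw [splitL_eq_cut] at this
            simp only [List.length_cons] at hp this; omega
          rw [aLoop, bSolve]
          show (if checkL ((splitL (c :: rest) 0).1) [] then
                  aLoop ((splitL (c :: rest) 0).2) ([] ++ (splitL (c :: rest) 0).1)
                else [] ++ ['('] ++ aLoop ((splitL (c :: rest) 0).2) [] ++ [')'] ++
                  convertL ((splitL (c :: rest) 0).1).tail.dropLast)
              = (if c = '(' then
                  ((c :: rest).take (cutIdx (c :: rest) 0)) ++
                    bSolve ((c :: rest).drop (cutIdx (c :: rest) 0))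
                 else '(' :: bSolve ((c :: rest).drop (cutIdx (c :: rest) 0)) ++
                   ')' :: flipL (((c :: rest).take (cutIdx (c :: rest) 0)).tail.dropLast))
          rw [checkL_split_head, splitL_eq_cut]
          by_cases hc : c = '('
          · subst hc
            simp only [decide_true, if_true]
            rw [aLoop_acc n _ hd, ih _ hd]
            simp
          · simp only [hc, decide_false, Bool.false_eq_true, if_false]
            rw [ih _ hd]
            simp [convertL_eq_flip]

-- ===== VERDICT (by name: the statement is the Claim_ definition above) =====
theorem solution_spec : Claim_equal_solution := by
  intro p _
  unfold Spec_solution solution solution_alt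
  rw [aLoop_eq_bSolve p.toList.length p.toList le_rfl]
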